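-- pv_equiv track=rewrite | github.com/TomCarton/AdventOfCode | 2021/day22/day22.py | count_uninterrupted
-- ===== SOURCE A (Python) =====
-- def get_subrange(crange, low, high):
--     c0, c1 = crange[0], crange[-1]
--     if c1 < low or c0 > high:
--         return []
--
--     c0 = min(c0, high)
--     c0 = max(c0, low)
--     c1 = min(c1, high)
--     c1 = max(c1, low)
--
--     return range(c0, c1 + 1)
--
-- def count_uninterrupted(item, rest):
--     _, xr, yr, zr = item
--     total = len(xr) * len(yr) * len(zr)
--
--     conflicts = []
--     ref_val = 0
--
--     for item in rest:
--         state, xr2, yr2, zr2 = item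
--
--         xsr = get_subrange(xr2, xr[0], xr[-1])
--         if len(xsr) == 0:
--             continue
--
--         ysr = get_subrange(yr2, yr[0], yr[-1])
--         if len(ysr) == 0:
--             continue
--
--         zsr = get_subrange(zr2, zr[0], zr[-1])
--         if len(zsr) == 0:
--             continue
--
--         conflicts.append((state, xsr, ysr, zsr))
--         ref_val += len(xsr) * len(ysr) * len(zsr)
--
--     for i, item in enumerate(conflicts):
--         total -= count_uninterrupted(item, conflicts[i + 1:])
--
--     return total
-- ===== SOURCE B (Python) =====
-- def count_uninterrupted(item, rest):
--     _, xr, yr, zr = item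
--     total = len(xr) * len(yr) * len(zr)
--     if not rest:
--         return total
--
--     def clamp(v, lo, hi):
--         return max(min(v, hi), lo)
--
--     xlo, xhi = xr[0], xr[-1]
--     ylo, yhi = yr[0], yr[-1]
--     zlo, zhi = zr[0], zr[-1]
--
--     # clip each later cuboid to this one's extent; keep the non-empty clips
--     boxes = []
--     for _, xr2, yr2, zr2 in rest:
--         if (xr2[-1] < xlo or xr2[0] > xhi or yr2[-1] < ylo or yr2[0] > yhi
--                 or zr2[-1] < zlo or zr2[0] > zhi):
--             continue
--         b = (clamp(xr2[0], xlo, xhi), clamp(xr2[-1], xlo, xhi),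
--              clamp(yr2[0], ylo, yhi), clamp(yr2[-1], ylo, yhi),
--              clamp(zr2[0], zlo, zhi), clamp(zr2[-1], zlo, zhi))
--         if b[0] <= b[1] and b[2] <= b[3] and b[4] <= b[5]:
--             boxes.append(b)
--
--     # coordinate compression: the union volume of the clips, cell by cell
--     xs = sorted({v for b in boxes for v in (b[0], b[1] + 1)})
--     ys = sorted({v for b in boxes for v in (b[2], b[3] + 1)})
--     zs = sorted({v for b in boxes for v in (b[4], b[5] + 1)})
--     covered = 0
--     for x0, x1 in zip(xs, xs[1:]):
--         for y0, y1 in zip(ys, ys[1:]):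
--             for z0, z1 in zip(zs, zs[1:]):
--                 if any(b[0] <= x0 <= b[1] and b[2] <= y0 <= b[3]
--                        and b[4] <= z0 <= b[5] for b in boxes):
--                     covered += (x1 - x0) * (y1 - y0) * (z1 - z0)
--     return total - covered
-- ===== Notes on version B (the rewrite author's own statement) =====
-- stated objective: faster
-- what changed: A subtracts, for every later overlapping cuboid, a recursive call on the remaining suffix (exponential inclusion-exclusion style recursion); B clips the later cuboids to the item's extent once and computes the volume of their union directly by coordinate compression (sorted distinct axis coordinates, one covered-cell sweep), with no recursion.
-- outside the precondition, e.g. on count_uninterrupted(('on', [0, 10], [0], [0]), [('on', [5, 3], [], [0])]): A returns 2, B raises IndexError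
import Mathlib
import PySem

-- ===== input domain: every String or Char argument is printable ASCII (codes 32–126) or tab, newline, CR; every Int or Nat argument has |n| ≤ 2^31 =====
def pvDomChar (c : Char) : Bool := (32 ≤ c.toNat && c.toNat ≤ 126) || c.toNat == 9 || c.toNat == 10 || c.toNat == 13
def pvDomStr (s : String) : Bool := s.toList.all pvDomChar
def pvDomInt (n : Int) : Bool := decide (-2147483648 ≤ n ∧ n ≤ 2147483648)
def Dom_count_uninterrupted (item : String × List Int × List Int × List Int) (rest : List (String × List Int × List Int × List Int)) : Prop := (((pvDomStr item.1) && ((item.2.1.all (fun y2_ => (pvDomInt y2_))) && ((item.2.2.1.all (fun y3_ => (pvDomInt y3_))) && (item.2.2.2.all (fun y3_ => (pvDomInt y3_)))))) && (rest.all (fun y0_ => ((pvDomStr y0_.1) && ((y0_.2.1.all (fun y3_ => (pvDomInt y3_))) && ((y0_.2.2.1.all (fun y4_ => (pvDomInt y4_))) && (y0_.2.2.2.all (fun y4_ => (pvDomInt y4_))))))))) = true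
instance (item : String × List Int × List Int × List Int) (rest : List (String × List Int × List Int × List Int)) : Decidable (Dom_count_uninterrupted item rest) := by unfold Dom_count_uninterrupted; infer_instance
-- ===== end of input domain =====

-- B replaces A's exponential suffix recursion by one coordinate-compression sweep over the
-- clipped later cuboids (union volume on a compressed grid); measurably faster, same values.

-- ===== PORT A =====
-- get_subrange(crange, low, high): crange[0]/crange[-1] (IndexError on [] is excluded by Pre_)
def pvGetSubrange (crange : List Int) (low high : Int) : List Int :=
  if PySem.List.pyGetD crange (-1) 0 < low ∨ PySem.List.pyGetD crange 0 0 > high then []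
  else PySem.List.pyRange (max (min (PySem.List.pyGetD crange 0 0) high) low)
    ((max (min (PySem.List.pyGetD crange (-1) 0) high) low) + 1) 1

-- A's first loop: build the 'conflicts' list (the dead accumulator 'ref_val' is never read
-- by A and is dropped here).
def pvConflicts (xr yr zr : List Int) :
    List (String × List Int × List Int × List Int) → List (String × List Int × List Int × List Int)
  | [] => []
  | (st, xr2, yr2, zr2) :: t =>
    if (pvGetSubrange xr2 (PySem.List.pyGetD xr 0 0) (PySem.List.pyGetD xr (-1) 0)).length = 0 then
      pvConflicts xr yr zr t
    else if (pvGetSubrange yr2 (PySem.List.pyGetD yr 0 0) (PySem.List.pyGetD yr (-1) 0)).length = 0 then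
      pvConflicts xr yr zr t
    else if (pvGetSubrange zr2 (PySem.List.pyGetD zr 0 0) (PySem.List.pyGetD zr (-1) 0)).length = 0 then
      pvConflicts xr yr zr t
    else
      (st, pvGetSubrange xr2 (PySem.List.pyGetD xr 0 0) (PySem.List.pyGetD xr (-1) 0),
        pvGetSubrange yr2 (PySem.List.pyGetD yr 0 0) (PySem.List.pyGetD yr (-1) 0),
        pvGetSubrange zr2 (PySem.List.pyGetD zr 0 0) (PySem.List.pyGetD zr (-1) 0)) ::
        pvConflicts xr yr zr t

theorem pvConflicts_length_le (xr yr zr : List Int)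
    (rest : List (String × List Int × List Int × List Int)) :
    (pvConflicts xr yr zr rest).length ≤ rest.length := by
  induction rest with
  | nil => simp [pvConflicts]
  | cons r t ih =>
    obtain ⟨st, xr2, yr2, zr2⟩ := r
    simp only [pvConflicts]
    split_ifs <;> simp <;> omega

mutual
-- A's body: total minus the second loop's subtractions (one recursive call per conflict,
-- on the suffix of the conflicts list).
def count_uninterrupted (item : String × List Int × List Int × List Int)
    (rest : List (String × List Int × List Int × List Int)) : Int :=
  ((item.2.1.length : Int) * (item.2.2.1.length : Int) * (item.2.2.2.length : Int)) -
    pvSubLoop (pvConflicts item.2.1 item.2.2.1 item.2.2.2 rest)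
termination_by (rest.length, 1)
decreasing_by
  have h := pvConflicts_length_le item.2.1 item.2.2.1 item.2.2.2 rest
  rcases lt_or_eq_of_le h with h' | h'
  · exact Prod.Lex.left _ _ h'
  · rw [h']; exact Prod.Lex.right _ (by omega)

-- A's second loop: for i, c in enumerate(conflicts): total -= count(c, conflicts[i+1:])
def pvSubLoop : List (String × List Int × List Int × List Int) → Int
  | [] => 0
  | c :: t => count_uninterrupted c t + pvSubLoop t
termination_by cs => (cs.length, 0)
decreasing_by
  · exact Prod.Lex.left _ _ (by simp)
  · exact Prod.Lex.left _ _ (by simp)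
end

-- ===== PORT B =====
def pvClamp (v lo hi : Int) : Int := max (min v hi) lo

-- B's first loop: clip each later cuboid to the item's extent, keep the non-empty clips.
def pvClips (xlo xhi ylo yhi zlo zhi : Int) :
    List (String × List Int × List Int × List Int) → List (Int × Int × Int × Int × Int × Int)
  | [] => []
  | (_, xr2, yr2, zr2) :: t =>
    if PySem.List.pyGetD xr2 (-1) 0 < xlo ∨ PySem.List.pyGetD xr2 0 0 > xhi ∨
        PySem.List.pyGetD yr2 (-1) 0 < ylo ∨ PySem.List.pyGetD yr2 0 0 > yhi ∨
        PySem.List.pyGetD zr2 (-1) 0 < zlo ∨ PySem.List.pyGetD zr2 0 0 > zhi then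
      pvClips xlo xhi ylo yhi zlo zhi t
    else if pvClamp (PySem.List.pyGetD xr2 0 0) xlo xhi ≤ pvClamp (PySem.List.pyGetD xr2 (-1) 0) xlo xhi ∧
        pvClamp (PySem.List.pyGetD yr2 0 0) ylo yhi ≤ pvClamp (PySem.List.pyGetD yr2 (-1) 0) ylo yhi ∧
        pvClamp (PySem.List.pyGetD zr2 0 0) zlo zhi ≤ pvClamp (PySem.List.pyGetD zr2 (-1) 0) zlo zhi then
      (pvClamp (PySem.List.pyGetD xr2 0 0) xlo xhi, pvClamp (PySem.List.pyGetD xr2 (-1) 0) xlo xhi,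
        pvClamp (PySem.List.pyGetD yr2 0 0) ylo yhi, pvClamp (PySem.List.pyGetD yr2 (-1) 0) ylo yhi,
        pvClamp (PySem.List.pyGetD zr2 0 0) zlo zhi, pvClamp (PySem.List.pyGetD zr2 (-1) 0) zlo zhi) ::
        pvClips xlo xhi ylo yhi zlo zhi t
    else pvClips xlo xhi ylo yhi zlo zhi t

-- sorted({...}) of the axis coordinates
def pvSortedCoords (l : List Int) : List Int :=
  PySem.List.sorted (PySem.Set.ofList l) (fun v => v) false

-- any(b covers the cell corner for b in boxes)
def pvCover (boxes : List (Int × Int × Int × Int × Int × Int)) (x y z : Int) : Bool :=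
  boxes.any (fun b => decide (b.1 ≤ x) && decide (x ≤ b.2.1) && decide (b.2.2.1 ≤ y) &&
    decide (y ≤ b.2.2.2.1) && decide (b.2.2.2.2.1 ≤ z) && decide (z ≤ b.2.2.2.2.2))

-- B's covered-cell sweep: the three nested zip loops accumulating cell volumes.
def pvCellSum (boxes : List (Int × Int × Int × Int × Int × Int)) (xs ys zs : List Int) : Int :=
  ((xs.zip xs.tail).map (fun p =>
    ((ys.zip ys.tail).map (fun q =>
      ((zs.zip zs.tail).map (fun r =>
        if pvCover boxes p.1 q.1 r.1 then (p.2 - p.1) * (q.2 - q.1) * (r.2 - r.1) else 0)).sum)).sum)).sum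

def count_uninterrupted_alt (item : String × List Int × List Int × List Int)
    (rest : List (String × List Int × List Int × List Int)) : Int :=
  let xr := item.2.1
  let yr := item.2.2.1
  let zr := item.2.2.2
  let total : Int := (xr.length : Int) * (yr.length : Int) * (zr.length : Int)
  if rest = [] then total
  else
    let boxes := pvClips (PySem.List.pyGetD xr 0 0) (PySem.List.pyGetD xr (-1) 0)
      (PySem.List.pyGetD yr 0 0) (PySem.List.pyGetD yr (-1) 0)
      (PySem.List.pyGetD zr 0 0) (PySem.List.pyGetD zr (-1) 0) rest
    let xs := pvSortedCoords (boxes.flatMap (fun b => [b.1, b.2.1 + 1]))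
    let ys := pvSortedCoords (boxes.flatMap (fun b => [b.2.2.1, b.2.2.2.1 + 1]))
    let zs := pvSortedCoords (boxes.flatMap (fun b => [b.2.2.2.2.1, b.2.2.2.2.2 + 1]))
    total - pvCellSum boxes xs ys zs

-- ===== PRECONDITION & SPEC =====
-- Pre_ excludes inputs with an empty coordinate list in a position the programs read (xr of the
-- item and xr2 of every later cuboid always; yr2/zr2 of a later cuboid once its earlier axes
-- overlap the item's): there Python raises IndexError — except that A still returns when an
-- empty later list hides behind an overlapping axis whose clipped range is empty, where B
-- (which tests only overlap before reading the next axis) raises instead.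
def Pre_count_uninterrupted (item : String × List Int × List Int × List Int)
    (rest : List (String × List Int × List Int × List Int)) : Prop :=
  rest = [] ∨ (item.2.1 ≠ [] ∧ item.2.2.1 ≠ [] ∧ item.2.2.2 ≠ [] ∧
    ∀ r ∈ rest, r.2.1 ≠ [] ∧
      (¬ (PySem.List.pyGetD r.2.1 (-1) 0 < PySem.List.pyGetD item.2.1 0 0 ∨
          PySem.List.pyGetD r.2.1 0 0 > PySem.List.pyGetD item.2.1 (-1) 0) → r.2.2.1 ≠ []) ∧
      (¬ (PySem.List.pyGetD r.2.1 (-1) 0 < PySem.List.pyGetD item.2.1 0 0 ∨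
          PySem.List.pyGetD r.2.1 0 0 > PySem.List.pyGetD item.2.1 (-1) 0) ∧
       ¬ (PySem.List.pyGetD r.2.2.1 (-1) 0 < PySem.List.pyGetD item.2.2.1 0 0 ∨
          PySem.List.pyGetD r.2.2.1 0 0 > PySem.List.pyGetD item.2.2.1 (-1) 0) → r.2.2.2 ≠ []))
instance (item : String × List Int × List Int × List Int) (rest : List (String × List Int × List Int × List Int)) : Decidable (Pre_count_uninterrupted item rest) := by unfold Pre_count_uninterrupted; infer_instance

def pvWitness_count_uninterrupted :
    (String × List Int × List Int × List Int) × (List (String × List Int × List Int × List Int)) :=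
  (("on", [0, 1], [0], [0]), [("on", [1, 2], [0], [-1, 0, 1])])

def Spec_count_uninterrupted (item : String × List Int × List Int × List Int) (rest : List (String × List Int × List Int × List Int)) (out : Int) : Prop := out = count_uninterrupted_alt item rest
instance (item : String × List Int × List Int × List Int) (rest : List (String × List Int × List Int × List Int)) (out : Int) : Decidable (Spec_count_uninterrupted item rest out) := by unfold Spec_count_uninterrupted; infer_instance

-- ===== CLAIM (what is proved, stated in full; the proofs are below) =====
def Claim_equal_count_uninterrupted : Prop := ∀ (item : String × List Int × List Int × List Int) (rest : List (String × List Int × List Int × List Int)), Dom_count_uninterrupted item rest → Pre_count_uninterrupted item rest → Spec_count_uninterrupted item rest (count_uninterrupted item rest)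

-- ===== LEMMAS AND PROOFS =====

-- the box of a conflict/rest item: (x0, x1, y0, y1, z0, z1) read off its three lists
def pvBoxOf (it : String × List Int × List Int × List Int) : Int × Int × Int × Int × Int × Int :=
  (PySem.List.pyGetD it.2.1 0 0, PySem.List.pyGetD it.2.1 (-1) 0,
   PySem.List.pyGetD it.2.2.1 0 0, PySem.List.pyGetD it.2.2.1 (-1) 0,
   PySem.List.pyGetD it.2.2.2 0 0, PySem.List.pyGetD it.2.2.2 (-1) 0)

-- the set of integer points of a box
noncomputable def pvToF (b : Int × Int × Int × Int × Int × Int) : Finset (Int × Int × Int) :=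
  Finset.Icc b.1 b.2.1 ×ˢ (Finset.Icc b.2.2.1 b.2.2.2.1 ×ˢ Finset.Icc b.2.2.2.2.1 b.2.2.2.2.2)

-- the set of integer points of a list of boxes
noncomputable def pvUF (l : List (Int × Int × Int × Int × Int × Int)) : Finset (Int × Int × Int) :=
  l.foldr (fun b s => pvToF b ∪ s) ∅

theorem mem_pvToF (b : Int × Int × Int × Int × Int × Int) (p : Int × Int × Int) :
    p ∈ pvToF b ↔ b.1 ≤ p.1 ∧ p.1 ≤ b.2.1 ∧ b.2.2.1 ≤ p.2.1 ∧ p.2.1 ≤ b.2.2.2.1 ∧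
      b.2.2.2.2.1 ≤ p.2.2 ∧ p.2.2 ≤ b.2.2.2.2.2 := by
  simp [pvToF, Finset.mem_product, Finset.mem_Icc]; tauto

theorem mem_pvUF (l : List (Int × Int × Int × Int × Int × Int)) (p : Int × Int × Int) :
    p ∈ pvUF l ↔ ∃ b ∈ l, p ∈ pvToF b := by
  induction l with
  | nil => simp [pvUF]
  | cons b t ih => simp [pvUF, List.foldr] at ih ⊢; rw [ih]

-- a "proper" coordinate list: a non-empty contiguous integer range (what A's conflicts carry)
def pvProperL (l : List Int) : Prop := ∃ a b : Int, a ≤ b ∧ l = PySem.List.pyRange a (b + 1) 1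
def pvProper (it : String × List Int × List Int × List Int) : Prop :=
  pvProperL it.2.1 ∧ pvProperL it.2.2.1 ∧ pvProperL it.2.2.2

theorem pvProperL_facts (l : List Int) (a b : Int) (hab : a ≤ b)
    (hl : l = PySem.List.pyRange a (b + 1) 1) :
    PySem.List.pyGetD l 0 0 = a ∧ PySem.List.pyGetD l (-1) 0 = b ∧ l ≠ [] ∧
      (l.length : Int) = b + 1 - a := by
  subst hl
  refine ⟨?_, ?_, ?_, ?_⟩
  · rw [PySem.List.pyRange_one_cons (by omega), PySem.List.pyGetD_zero_cons]
  · rw [PySem.List.pyRange_one_succ_right (by omega), PySem.List.pyGetD_neg_one_append_singleton]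
  · rw [PySem.List.pyRange_one_cons (by omega)]; simp
  · rw [PySem.List.length_pyRange_one]; omega

-- the A-side skip condition on one axis equals the B-side one
theorem pvGetSubrange_len_zero_iff (crange : List Int) (low high : Int) :
    (pvGetSubrange crange low high).length = 0 ↔
      (PySem.List.pyGetD crange (-1) 0 < low ∨ PySem.List.pyGetD crange 0 0 > high ∨
        ¬ pvClamp (PySem.List.pyGetD crange 0 0) low high ≤
            pvClamp (PySem.List.pyGetD crange (-1) 0) low high) := by
  unfold pvGetSubrange pvClamp
  split_ifs with h
  · simp only [List.length_nil]; tauto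
  · rw [PySem.List.length_pyRange_one]
    simp only [max_def, min_def]
    split_ifs <;> omega

theorem pvGetSubrange_eq (crange : List Int) (low high : Int)
    (h : ¬ (pvGetSubrange crange low high).length = 0) :
    pvGetSubrange crange low high =
      PySem.List.pyRange (pvClamp (PySem.List.pyGetD crange 0 0) low high)
        (pvClamp (PySem.List.pyGetD crange (-1) 0) low high + 1) 1 := by
  unfold pvGetSubrange pvClamp
  unfold pvGetSubrange at h
  split_ifs with h2
  · exfalso; simp [h2] at h
  · rfl

theorem pvGetSubrange_box (c : List Int) (lo hi : Int)
    (h : ¬ (pvGetSubrange c lo hi).length = 0) :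
    PySem.List.pyGetD (pvGetSubrange c lo hi) 0 0 = pvClamp (PySem.List.pyGetD c 0 0) lo hi ∧
      PySem.List.pyGetD (pvGetSubrange c lo hi) (-1) 0 = pvClamp (PySem.List.pyGetD c (-1) 0) lo hi ∧
      pvProperL (pvGetSubrange c lo hi) := by
  have hv : pvClamp (PySem.List.pyGetD c 0 0) lo hi ≤ pvClamp (PySem.List.pyGetD c (-1) 0) lo hi := by
    by_contra hv
    exact h ((pvGetSubrange_len_zero_iff c lo hi).2 (Or.inr (Or.inr hv)))
  have he := pvGetSubrange_eq c lo hi h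
  obtain ⟨h1, h2, _, _⟩ := pvProperL_facts _ _ _ hv he
  exact ⟨h1, h2, _, _, hv, he⟩

-- conflicts ↔ clips correspondence, and conflicts are proper
set_option maxHeartbeats 1000000 in
theorem pvConflicts_map_boxOf (xr yr zr : List Int)
    (rest : List (String × List Int × List Int × List Int)) :
    (pvConflicts xr yr zr rest).map pvBoxOf =
      pvClips (PySem.List.pyGetD xr 0 0) (PySem.List.pyGetD xr (-1) 0)
        (PySem.List.pyGetD yr 0 0) (PySem.List.pyGetD yr (-1) 0)
        (PySem.List.pyGetD zr 0 0) (PySem.List.pyGetD zr (-1) 0) rest := by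
  induction rest with
  | nil => simp [pvConflicts, pvClips]
  | cons r t ih =>
    obtain ⟨st, xr2, yr2, zr2⟩ := r
    have hx' := pvGetSubrange_len_zero_iff xr2 (PySem.List.pyGetD xr 0 0) (PySem.List.pyGetD xr (-1) 0)
    have hy' := pvGetSubrange_len_zero_iff yr2 (PySem.List.pyGetD yr 0 0) (PySem.List.pyGetD yr (-1) 0)
    have hz' := pvGetSubrange_len_zero_iff zr2 (PySem.List.pyGetD zr 0 0) (PySem.List.pyGetD zr (-1) 0)
    by_cases hx : (pvGetSubrange xr2 (PySem.List.pyGetD xr 0 0) (PySem.List.pyGetD xr (-1) 0)).length = 0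
    case pos =>
      simp only [pvConflicts, pvClips, if_pos hx]
      rw [hx'] at hx
      split_ifs with hg hv
      · exact ih
      · exfalso
        rcases hx with h | h | h
        · exact hg (Or.inl h)
        · exact hg (Or.inr (Or.inl h))
        · exact h hv.1
      · exact ih
    case neg =>
      by_cases hy : (pvGetSubrange yr2 (PySem.List.pyGetD yr 0 0) (PySem.List.pyGetD yr (-1) 0)).length = 0
      case pos =>
        simp only [pvConflicts, pvClips, if_neg hx, if_pos hy]
        rw [hy'] at hy
        split_ifs with hg hv
        · exact ih
        · exfalso
          rcases hy with h | h | h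
          · exact hg (Or.inr (Or.inr (Or.inl h)))
          · exact hg (Or.inr (Or.inr (Or.inr (Or.inl h))))
          · exact h hv.2.1
        · exact ih
      case neg =>
        by_cases hz : (pvGetSubrange zr2 (PySem.List.pyGetD zr 0 0) (PySem.List.pyGetD zr (-1) 0)).length = 0
        case pos =>
          simp only [pvConflicts, pvClips, if_neg hx, if_neg hy, if_pos hz]
          rw [hz'] at hz
          split_ifs with hg hv
          · exact ih
          · exfalso
            rcases hz with h | h | h
            · exact hg (Or.inr (Or.inr (Or.inr (Or.inr (Or.inl h)))))
            · exact hg (Or.inr (Or.inr (Or.inr (Or.inr (Or.inr h)))))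
            · exact h hv.2.2
          · exact ih
        case neg =>
          simp only [pvConflicts, pvClips, if_neg hx, if_neg hy, if_neg hz]
          obtain ⟨hbx0, hbx1, _⟩ := pvGetSubrange_box xr2 _ _ hx
          obtain ⟨hby0, hby1, _⟩ := pvGetSubrange_box yr2 _ _ hy
          obtain ⟨hbz0, hbz1, _⟩ := pvGetSubrange_box zr2 _ _ hz
          rw [hx'] at hx; rw [hy'] at hy; rw [hz'] at hz
          have vx : _ := fun hq => hx (Or.inr (Or.inr hq))
          have vy : _ := fun hq => hy (Or.inr (Or.inr hq))
          have vz : _ := fun hq => hz (Or.inr (Or.inr hq))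
          split_ifs with hg hv
          · exfalso
            rcases hg with h | h | h | h | h | h
            · exact hx (Or.inl h)
            · exact hx (Or.inr (Or.inl h))
            · exact hy (Or.inl h)
            · exact hy (Or.inr (Or.inl h))
            · exact hz (Or.inl h)
            · exact hz (Or.inr (Or.inl h))
          · simp only [List.map_cons, pvBoxOf, hbx0, hbx1, hby0, hby1, hbz0, hbz1, ih]
          · exact absurd ⟨not_not.1 vx, not_not.1 vy, not_not.1 vz⟩ hv

theorem pvConflicts_proper (xr yr zr : List Int)
    (rest : List (String × List Int × List Int × List Int)) :
    ∀ c ∈ pvConflicts xr yr zr rest, pvProper c := by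
  induction rest with
  | nil => simp [pvConflicts]
  | cons r t ih =>
    obtain ⟨st, xr2, yr2, zr2⟩ := r
    simp only [pvConflicts]
    split_ifs with hx hy hz
    · exact ih
    · exact ih
    · exact ih
    · intro c hc
      rcases List.mem_cons.1 hc with h | h
      · subst h
        exact ⟨(pvGetSubrange_box xr2 _ _ hx).2.2, (pvGetSubrange_box yr2 _ _ hy).2.2,
          (pvGetSubrange_box zr2 _ _ hz).2.2⟩
      · exact ih c h

theorem pvUF_cons (b : Int × Int × Int × Int × Int × Int)
    (l : List (Int × Int × Int × Int × Int × Int)) : pvUF (b :: l) = pvToF b ∪ pvUF l := rfl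

-- one axis of the clip is the intersection of the two intervals
theorem pvClamp_mem_iff (lo hi c0 c1 v : Int) (h1 : lo ≤ hi) (h2 : ¬ (c1 < lo ∨ c0 > hi)) :
    (pvClamp c0 lo hi ≤ v ∧ v ≤ pvClamp c1 lo hi) ↔ (lo ≤ v ∧ v ≤ hi) ∧ (c0 ≤ v ∧ v ≤ c1) := by
  simp only [pvClamp, max_def, min_def]
  split_ifs <;> omega

-- clips of a proper box are exactly the intersections with it
set_option maxHeartbeats 2000000 in
theorem pvUF_clips (xlo xhi ylo yhi zlo zhi : Int) (hx : xlo ≤ xhi) (hy : ylo ≤ yhi)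
    (hz : zlo ≤ zhi) (t : List (String × List Int × List Int × List Int)) :
    pvUF (pvClips xlo xhi ylo yhi zlo zhi t) =
      pvToF (xlo, xhi, ylo, yhi, zlo, zhi) ∩ pvUF (t.map pvBoxOf) := by
  induction t with
  | nil => simp [pvClips, pvUF]
  | cons r t ih =>
    obtain ⟨st, xr2, yr2, zr2⟩ := r
    simp only [pvClips, List.map_cons, pvBoxOf]
    split_ifs with hg hv
    · -- axis-disjoint: the head contributes nothing
      rw [ih, pvUF_cons, Finset.inter_union_distrib_left]
      have hempty : pvToF (xlo, xhi, ylo, yhi, zlo, zhi) ∩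
          pvToF (PySem.List.pyGetD xr2 0 0, PySem.List.pyGetD xr2 (-1) 0,
            PySem.List.pyGetD yr2 0 0, PySem.List.pyGetD yr2 (-1) 0,
            PySem.List.pyGetD zr2 0 0, PySem.List.pyGetD zr2 (-1) 0) = ∅ := by
        rw [Finset.eq_empty_iff_forall_notMem]
        intro p hp
        rw [Finset.mem_inter, mem_pvToF, mem_pvToF] at hp
        rcases hg with h | h | h | h | h | h <;> simp at hp <;> omega
      rw [hempty]; simp
    · -- kept: the head clip is exactly the intersection with the item box
      have hngx : ¬ (PySem.List.pyGetD xr2 (-1) 0 < xlo ∨ PySem.List.pyGetD xr2 0 0 > xhi) := by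
        rintro (h | h)
        · exact hg (Or.inl h)
        · exact hg (Or.inr (Or.inl h))
      have hngy : ¬ (PySem.List.pyGetD yr2 (-1) 0 < ylo ∨ PySem.List.pyGetD yr2 0 0 > yhi) := by
        rintro (h | h)
        · exact hg (Or.inr (Or.inr (Or.inl h)))
        · exact hg (Or.inr (Or.inr (Or.inr (Or.inl h))))
      have hngz : ¬ (PySem.List.pyGetD zr2 (-1) 0 < zlo ∨ PySem.List.pyGetD zr2 0 0 > zhi) := by
        rintro (h | h)
        · exact hg (Or.inr (Or.inr (Or.inr (Or.inr (Or.inl h)))))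
        · exact hg (Or.inr (Or.inr (Or.inr (Or.inr (Or.inr h)))))
      rw [pvUF_cons, ih, pvUF_cons, Finset.inter_union_distrib_left]
      congr 1
      ext p
      rw [Finset.mem_inter, mem_pvToF, mem_pvToF, mem_pvToF]
      have ax := pvClamp_mem_iff xlo xhi (PySem.List.pyGetD xr2 0 0) (PySem.List.pyGetD xr2 (-1) 0) p.1 hx hngx
      have ay := pvClamp_mem_iff ylo yhi (PySem.List.pyGetD yr2 0 0) (PySem.List.pyGetD yr2 (-1) 0) p.2.1 hy hngy
      have az := pvClamp_mem_iff zlo zhi (PySem.List.pyGetD zr2 0 0) (PySem.List.pyGetD zr2 (-1) 0) p.2.2 hz hngz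
      simp only at ax ay az ⊢
      constructor
      · rintro ⟨a1, a2, a3, a4, a5, a6⟩
        obtain ⟨⟨b1, b2⟩, b3, b4⟩ := ax.1 ⟨a1, a2⟩
        obtain ⟨⟨c1, c2⟩, c3, c4⟩ := ay.1 ⟨a3, a4⟩
        obtain ⟨⟨d1, d2⟩, d3, d4⟩ := az.1 ⟨a5, a6⟩
        exact ⟨⟨b1, b2, c1, c2, d1, d2⟩, b3, b4, c3, c4, d3, d4⟩
      · rintro ⟨⟨b1, b2, c1, c2, d1, d2⟩, b3, b4, c3, c4, d3, d4⟩
        obtain ⟨e1, e2⟩ := ax.2 ⟨⟨b1, b2⟩, b3, b4⟩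
        obtain ⟨f1, f2⟩ := ay.2 ⟨⟨c1, c2⟩, c3, c4⟩
        obtain ⟨g1, g2⟩ := az.2 ⟨⟨d1, d2⟩, d3, d4⟩
        exact ⟨e1, e2, f1, f2, g1, g2⟩
    · -- overlapping but an axis clip is empty: intersection is empty too
      have hngx : ¬ (PySem.List.pyGetD xr2 (-1) 0 < xlo ∨ PySem.List.pyGetD xr2 0 0 > xhi) := by
        rintro (h | h)
        · exact hg (Or.inl h)
        · exact hg (Or.inr (Or.inl h))
      have hngy : ¬ (PySem.List.pyGetD yr2 (-1) 0 < ylo ∨ PySem.List.pyGetD yr2 0 0 > yhi) := by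
        rintro (h | h)
        · exact hg (Or.inr (Or.inr (Or.inl h)))
        · exact hg (Or.inr (Or.inr (Or.inr (Or.inl h))))
      have hngz : ¬ (PySem.List.pyGetD zr2 (-1) 0 < zlo ∨ PySem.List.pyGetD zr2 0 0 > zhi) := by
        rintro (h | h)
        · exact hg (Or.inr (Or.inr (Or.inr (Or.inr (Or.inl h)))))
        · exact hg (Or.inr (Or.inr (Or.inr (Or.inr (Or.inr h)))))
      rw [ih, pvUF_cons, Finset.inter_union_distrib_left]
      have hempty : pvToF (xlo, xhi, ylo, yhi, zlo, zhi) ∩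
          pvToF (PySem.List.pyGetD xr2 0 0, PySem.List.pyGetD xr2 (-1) 0,
            PySem.List.pyGetD yr2 0 0, PySem.List.pyGetD yr2 (-1) 0,
            PySem.List.pyGetD zr2 0 0, PySem.List.pyGetD zr2 (-1) 0) = ∅ := by
        rw [Finset.eq_empty_iff_forall_notMem]
        intro p hp
        rw [Finset.mem_inter, mem_pvToF, mem_pvToF] at hp
        simp only at hp
        obtain ⟨⟨a1, a2, a3, a4, a5, a6⟩, b1, b2, b3, b4, b5, b6⟩ := hp
        have ax := pvClamp_mem_iff xlo xhi (PySem.List.pyGetD xr2 0 0) (PySem.List.pyGetD xr2 (-1) 0) p.1 hx hngx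
        have ay := pvClamp_mem_iff ylo yhi (PySem.List.pyGetD yr2 0 0) (PySem.List.pyGetD yr2 (-1) 0) p.2.1 hy hngy
        have az := pvClamp_mem_iff zlo zhi (PySem.List.pyGetD zr2 0 0) (PySem.List.pyGetD zr2 (-1) 0) p.2.2 hz hngz
        rcases not_and_or.1 hv with h | h
        · obtain ⟨e1, e2⟩ := ax.2 ⟨⟨a1, a2⟩, b1, b2⟩; omega
        · rcases not_and_or.1 h with h' | h'
          · obtain ⟨e1, e2⟩ := ay.2 ⟨⟨a3, a4⟩, b3, b4⟩; omega
          · obtain ⟨e1, e2⟩ := az.2 ⟨⟨a5, a6⟩, b5, b6⟩; omega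
      rw [hempty]; simp

-- A's suffix recursion computes the cardinality of the union of the conflict boxes
theorem pvSubLoop_card :
    ∀ (n : Nat) (cs : List (String × List Int × List Int × List Int)), cs.length ≤ n →
      (∀ c ∈ cs, pvProper c) → pvSubLoop cs = ((pvUF (cs.map pvBoxOf)).card : Int) := by
  intro n
  induction n with
  | zero =>
    intro cs hlen _
    rw [List.length_eq_zero_iff.1 (Nat.le_zero.1 hlen)]
    simp [pvSubLoop, pvUF]
  | succ n ihn =>
    intro cs hlen hprop
    cases cs with
    | nil => simp [pvSubLoop, pvUF]
    | cons c t =>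
      obtain ⟨hpx, hpy, hpz⟩ := hprop c List.mem_cons_self
      obtain ⟨ax, bx, habx, hlx⟩ := hpx
      obtain ⟨ay, by', haby, hly⟩ := hpy
      obtain ⟨az, bz, habz, hlz⟩ := hpz
      obtain ⟨fx0, fx1, _, fxl⟩ := pvProperL_facts _ _ _ habx hlx
      obtain ⟨fy0, fy1, _, fyl⟩ := pvProperL_facts _ _ _ haby hly
      obtain ⟨fz0, fz1, _, fzl⟩ := pvProperL_facts _ _ _ habz hlz
      have hlen' : t.length ≤ n := by simp only [List.length_cons] at hlen; omega
      have h3 : pvSubLoop t = ((pvUF (t.map pvBoxOf)).card : Int) :=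
        ihn t hlen' (fun d hd => hprop d (List.mem_cons_of_mem _ hd))
      have hlenconf := pvConflicts_length_le c.2.1 c.2.2.1 c.2.2.2 t
      have h1 : pvSubLoop (pvConflicts c.2.1 c.2.2.1 c.2.2.2 t) =
          ((pvUF ((pvConflicts c.2.1 c.2.2.1 c.2.2.2 t).map pvBoxOf)).card : Int) :=
        ihn _ (le_trans hlenconf hlen') (pvConflicts_proper _ _ _ _)
      rw [pvConflicts_map_boxOf, fx0, fx1, fy0, fy1, fz0, fz1] at h1
      rw [pvUF_clips ax bx ay by' az bz habx haby habz t] at h1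
      have hbox : pvBoxOf c = (ax, bx, ay, by', az, bz) := by
        simp [pvBoxOf, fx0, fx1, fy0, fy1, fz0, fz1]
      have hA : ((pvToF (ax, bx, ay, by', az, bz)).card : Int) =
          ((c.2.1.length : Int) * (c.2.2.1.length : Int) * (c.2.2.2.length : Int)) := by
        simp only [pvToF, Finset.card_product, Int.card_Icc]
        push_cast
        rw [Int.toNat_of_nonneg (by omega), Int.toNat_of_nonneg (by omega),
          Int.toNat_of_nonneg (by omega), fxl, fyl, fzl]
        ring
      have key := Finset.card_union_add_card_inter (pvToF (ax, bx, ay, by', az, bz))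
        (pvUF (t.map pvBoxOf))
      rw [pvSubLoop, count_uninterrupted, h1, h3, List.map_cons, hbox, pvUF_cons]
      have keyz : ((pvToF (ax, bx, ay, by', az, bz) ∪ pvUF (t.map pvBoxOf)).card : Int) +
          ((pvToF (ax, bx, ay, by', az, bz) ∩ pvUF (t.map pvBoxOf)).card : Int) =
          ((pvToF (ax, bx, ay, by', az, bz)).card : Int) + ((pvUF (t.map pvBoxOf)).card : Int) := by
        exact_mod_cast congrArg (Nat.cast : Nat → Int) key
      omega


-- ---- compressed-grid infrastructure ----
theorem pvSortedCoords_lt (l : List Int) : (pvSortedCoords l).Pairwise (· < ·) :=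
  PySem.List.sorted_ofList_pairwise_lt l

theorem mem_pvSortedCoords (l : List Int) (v : Int) : v ∈ pvSortedCoords l ↔ v ∈ l := by
  rw [pvSortedCoords, PySem.List.mem_sorted, PySem.Set.mem_ofList]

theorem pvPairs_lt : ∀ (xs : List Int), xs.Pairwise (· < ·) →
    ∀ p ∈ xs.zip xs.tail, p.1 < p.2 := by
  intro xs
  induction xs with
  | nil => intro _ p hp; simp at hp
  | cons x rest ih =>
    intro hs p hp
    cases rest with
    | nil => simp at hp
    | cons y t =>
      rw [List.tail_cons, List.zip_cons_cons] at hp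
      rcases List.mem_cons.1 hp with h | h
      · subst h; exact (List.pairwise_cons.1 hs).1 y List.mem_cons_self
      · exact ih (List.pairwise_cons.1 hs).2 p h

theorem pvPairs_next : ∀ (xs : List Int), xs.Pairwise (· < ·) →
    ∀ p ∈ xs.zip xs.tail, ∀ v ∈ xs, p.1 < v → p.2 ≤ v := by
  intro xs
  induction xs with
  | nil => intro _ p hp; simp at hp
  | cons x rest ih =>
    intro hs p hp v hv hlt
    cases rest with
    | nil => simp at hp
    | cons y t =>
      have hhead := (List.pairwise_cons.1 hs).1
      have htail := (List.pairwise_cons.1 hs).2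
      rw [List.tail_cons, List.zip_cons_cons] at hp
      rcases List.mem_cons.1 hp with h | h
      · subst h
        rcases List.mem_cons.1 hv with h' | h'
        · omega
        · rcases List.mem_cons.1 h' with h'' | h''
          · omega
          · exact le_of_lt ((List.pairwise_cons.1 htail).1 v h'')
      · rcases List.mem_cons.1 hv with h' | h'
        · exfalso
          have hm := (List.of_mem_zip (a := p.1) (b := p.2) (by simpa using h)).1
          have := hhead p.1 hm
          omega
        · exact ih htail p h v h' hlt

theorem pvPairs_sep : ∀ (xs : List Int), xs.Pairwise (· < ·) →
    (xs.zip xs.tail).Pairwise (fun p q => p.2 ≤ q.1) := by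
  intro xs
  induction xs with
  | nil => intro _; simp
  | cons x rest ih =>
    intro hs
    cases rest with
    | nil => simp
    | cons y t =>
      rw [List.tail_cons, List.zip_cons_cons]
      refine List.pairwise_cons.2 ⟨?_, ih (List.pairwise_cons.1 hs).2⟩
      intro q hq
      have hm := (List.of_mem_zip (a := q.1) (b := q.2) (by simpa using hq)).1
      rcases List.mem_cons.1 hm with h | h
      · omega
      · exact le_of_lt ((List.pairwise_cons.1 (List.pairwise_cons.1 hs).2).1 q.1 h)

theorem pvPairs_find : ∀ (xs : List Int), xs.Pairwise (· < ·) →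
    ∀ (u w v : Int), u ∈ xs → w ∈ xs → u ≤ v → v < w →
      ∃ p ∈ xs.zip xs.tail, p.1 ≤ v ∧ v < p.2 := by
  intro xs
  induction xs with
  | nil => intro _ u w v hu; simp at hu
  | cons x rest ih =>
    intro hs u w v hu hw huv hvw
    cases rest with
    | nil =>
      exfalso
      rcases List.mem_cons.1 hu with h | h
      · rcases List.mem_cons.1 hw with h' | h'
        · omega
        · simp_all
      · simp at h
    | cons y t =>
      have hhead := (List.pairwise_cons.1 hs).1
      have htail := (List.pairwise_cons.1 hs).2
      by_cases hv : v < y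
      · refine ⟨(x, y), ?_, ?_, hv⟩
        · rw [List.tail_cons, List.zip_cons_cons]; exact List.mem_cons_self
        · rcases List.mem_cons.1 hu with h | h
          · omega
          · exfalso
            rcases List.mem_cons.1 h with h' | h'
            · omega
            · have := (List.pairwise_cons.1 htail).1 u h'; omega
      · have hw' : w ∈ y :: t := by
          rcases List.mem_cons.1 hw with h | h
          · exfalso; have := hhead y List.mem_cons_self; omega
          · exact h
        obtain ⟨p, hp, h1, h2⟩ := ih htail y w v List.mem_cons_self hw' (by omega) hvw
        refine ⟨p, ?_, h1, h2⟩
        rw [List.tail_cons, List.zip_cons_cons]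
        exact List.mem_cons_of_mem _ hp

theorem pvPairs_nodup (xs : List Int) (hs : xs.Pairwise (· < ·)) : (xs.zip xs.tail).Nodup := by
  have hsep := pvPairs_sep xs hs
  refine List.Pairwise.imp_of_mem ?_ hsep
  intro p q hp _ hle heq
  have := pvPairs_lt xs hs p hp
  subst heq
  omega

theorem pvPairs_disjoint (xs : List Int) (hs : xs.Pairwise (· < ·)) :
    ∀ p ∈ xs.zip xs.tail, ∀ q ∈ xs.zip xs.tail, p ≠ q →
      Disjoint (Finset.Ico p.1 p.2) (Finset.Ico q.1 q.2) := by
  have hsep : (xs.zip xs.tail).Pairwise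
      (fun p q => Disjoint (Finset.Ico p.1 p.2) (Finset.Ico q.1 q.2)) := by
    refine (pvPairs_sep xs hs).imp ?_
    intro p q hle
    rw [Finset.disjoint_left]
    intro a ha ha'
    rw [Finset.mem_Ico] at ha ha'
    omega
  intro p hp q hq hne
  exact List.Pairwise.forall (fun a b h => h.symm) hsep hp hq hne

-- integer points of a grid cell
noncomputable def pvCellF (c : (Int × Int) × (Int × Int) × (Int × Int)) : Finset (Int × Int × Int) :=
  Finset.Ico c.1.1 c.1.2 ×ˢ (Finset.Ico c.2.1.1 c.2.1.2 ×ˢ Finset.Ico c.2.2.1 c.2.2.2)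

theorem mem_pvCellF (c : (Int × Int) × (Int × Int) × (Int × Int)) (p : Int × Int × Int) :
    p ∈ pvCellF c ↔ (c.1.1 ≤ p.1 ∧ p.1 < c.1.2) ∧ (c.2.1.1 ≤ p.2.1 ∧ p.2.1 < c.2.1.2) ∧
      (c.2.2.1 ≤ p.2.2 ∧ p.2.2 < c.2.2.2) := by
  simp [pvCellF, Finset.mem_product, Finset.mem_Ico]

theorem pvSum_map_product {α β : Type} (l₁ : List α) (l₂ : List β) (g : α × β → Int) :
    ((l₁ ×ˢ l₂).map g).sum = (l₁.map (fun a => ((l₂.map (fun b => g (a, b))).sum))).sum := by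
  induction l₁ with
  | nil => rfl
  | cons a l ih =>
    rw [List.product_cons, List.map_append, List.sum_append, ih, List.map_cons, List.sum_cons,
      List.map_map]
    rfl

theorem pvCard_partition : ∀ (l : List (Finset (Int × Int × Int))) (U : Finset (Int × Int × Int)),
    (∀ p ∈ U, ∃ c ∈ l, p ∈ c) → l.Pairwise Disjoint →
    (l.map (fun c => ((U ∩ c).card : Int))).sum = (U.card : Int) := by
  intro l
  induction l with
  | nil =>
    intro U hcov _
    have : U = ∅ := by
      rw [Finset.eq_empty_iff_forall_notMem]
      intro p hp
      obtain ⟨c, hc, _⟩ := hcov p hp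
      simp at hc
    simp [this]
  | cons c t ih =>
    intro U hcov hdis
    have hd := (List.pairwise_cons.1 hdis).1
    have ht := (List.pairwise_cons.1 hdis).2
    rw [List.map_cons, List.sum_cons]
    have h1 : ∀ ci ∈ t, U ∩ ci = (U \ c) ∩ ci := by
      intro ci hci
      ext p
      rw [Finset.mem_inter, Finset.mem_inter, Finset.mem_sdiff]
      constructor
      · rintro ⟨hU, hin⟩
        exact ⟨⟨hU, fun hc => (Finset.disjoint_left.1 (hd ci hci)) hc hin⟩, hin⟩
      · rintro ⟨⟨hU, _⟩, hin⟩
        exact ⟨hU, hin⟩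
    have hcov' : ∀ p ∈ U \ c, ∃ ci ∈ t, p ∈ ci := by
      intro p hp
      rw [Finset.mem_sdiff] at hp
      obtain ⟨ci, hci, hmem⟩ := hcov p hp.1
      rcases List.mem_cons.1 hci with h | h
      · subst h; exact absurd hmem hp.2
      · exact ⟨ci, h, hmem⟩
    have h2 := ih (U \ c) hcov' ht
    rw [List.map_congr_left (fun ci hci => by rw [h1 ci hci])]
    rw [h2]
    have := Finset.card_inter_add_card_sdiff U c
    have : ((U ∩ c).card : Int) + ((U \ c).card : Int) = (U.card : Int) := by exact_mod_cast this
    omega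

-- B's compressed-grid sweep computes the cardinality of the union of the boxes
theorem pvGrid_card (bs : List (Int × Int × Int × Int × Int × Int)) (xs ys zs : List Int)
    (hxs : xs.Pairwise (· < ·)) (hys : ys.Pairwise (· < ·)) (hzs : zs.Pairwise (· < ·))
    (hmx : ∀ b ∈ bs, b.1 ∈ xs ∧ b.2.1 + 1 ∈ xs)
    (hmy : ∀ b ∈ bs, b.2.2.1 ∈ ys ∧ b.2.2.2.1 + 1 ∈ ys)
    (hmz : ∀ b ∈ bs, b.2.2.2.2.1 ∈ zs ∧ b.2.2.2.2.2 + 1 ∈ zs) :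
    pvCellSum bs xs ys zs = ((pvUF bs).card : Int) := by
  have e1 : pvCellSum bs xs ys zs =
      (((xs.zip xs.tail) ×ˢ ((ys.zip ys.tail) ×ˢ (zs.zip zs.tail))).map
        (fun c => if pvCover bs c.1.1 c.2.1.1 c.2.2.1 then
          (c.1.2 - c.1.1) * (c.2.1.2 - c.2.1.1) * (c.2.2.2 - c.2.2.1) else 0)).sum := by
    rw [pvSum_map_product]
    refine congrArg List.sum (List.map_congr_left ?_)
    intro p _
    rw [pvSum_map_product]
  have key : ∀ c ∈ (xs.zip xs.tail) ×ˢ ((ys.zip ys.tail) ×ˢ (zs.zip zs.tail)),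
      (if pvCover bs c.1.1 c.2.1.1 c.2.2.1 then
        (c.1.2 - c.1.1) * (c.2.1.2 - c.2.1.1) * (c.2.2.2 - c.2.2.1) else 0) =
      ((pvUF bs ∩ pvCellF c).card : Int) := by
    rintro ⟨p, q, r⟩ hc
    dsimp only
    obtain ⟨hpx, hqr⟩ := List.mem_product.1 hc
    obtain ⟨hqy, hrz⟩ := List.mem_product.1 hqr
    by_cases hcover : pvCover bs p.1 q.1 r.1
    · rw [if_pos hcover]
      simp only [pvCover, List.any_eq_true, Bool.and_eq_true, decide_eq_true_eq] at hcover
      obtain ⟨b, hb, ⟨⟨⟨⟨hb1, hb2⟩, hb3⟩, hb4⟩, hb5⟩, hb6⟩ := hcover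
      have n1 := pvPairs_next xs hxs p hpx (b.2.1 + 1) (hmx b hb).2 (by omega)
      have n2 := pvPairs_next ys hys q hqy (b.2.2.2.1 + 1) (hmy b hb).2 (by omega)
      have n3 := pvPairs_next zs hzs r hrz (b.2.2.2.2.2 + 1) (hmz b hb).2 (by omega)
      have hsub : pvCellF (p, q, r) ⊆ pvUF bs := by
        intro pt hpt
        rw [mem_pvCellF] at hpt
        obtain ⟨⟨m1, m2⟩, ⟨m3, m4⟩, m5, m6⟩ := hpt
        simp only at m1 m2 m3 m4 m5 m6
        rw [mem_pvUF]
        refine ⟨b, hb, ?_⟩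
        rw [mem_pvToF]
        refine ⟨by omega, by omega, by omega, by omega, by omega, by omega⟩
      have hlt1 := pvPairs_lt xs hxs p hpx
      have hlt2 := pvPairs_lt ys hys q hqy
      have hlt3 := pvPairs_lt zs hzs r hrz
      have hcard : ((pvCellF (p, q, r)).card : Int) = (p.2 - p.1) * (q.2 - q.1) * (r.2 - r.1) := by
        simp only [pvCellF, Finset.card_product, Int.card_Ico]
        push_cast
        rw [Int.toNat_of_nonneg (by omega), Int.toNat_of_nonneg (by omega),
          Int.toNat_of_nonneg (by omega)]
        ring
      rw [Finset.inter_eq_right.2 hsub, hcard]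
    · rw [if_neg hcover]
      have hempty : pvUF bs ∩ pvCellF (p, q, r) = ∅ := by
        rw [Finset.eq_empty_iff_forall_notMem]
        intro pt hpt
        rw [Finset.mem_inter, mem_pvUF, mem_pvCellF] at hpt
        obtain ⟨⟨b, hb, hbmem⟩, ⟨m1, m2⟩, ⟨m3, m4⟩, m5, m6⟩ := hpt
        rw [mem_pvToF] at hbmem
        obtain ⟨i1, i2, i3, i4, i5, i6⟩ := hbmem
        simp only at m1 m2 m3 m4 m5 m6
        apply hcover
        have a1 : b.1 ≤ p.1 := by
          by_contra h
          push Not at h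
          have := pvPairs_next xs hxs p hpx b.1 (hmx b hb).1 h
          omega
        have a2 : b.2.2.1 ≤ q.1 := by
          by_contra h
          push Not at h
          have := pvPairs_next ys hys q hqy b.2.2.1 (hmy b hb).1 h
          omega
        have a3 : b.2.2.2.2.1 ≤ r.1 := by
          by_contra h
          push Not at h
          have := pvPairs_next zs hzs r hrz b.2.2.2.2.1 (hmz b hb).1 h
          omega
        simp only [pvCover, List.any_eq_true, Bool.and_eq_true, decide_eq_true_eq]
        exact ⟨b, hb, ⟨⟨⟨⟨⟨a1, by omega⟩, a2⟩, by omega⟩, a3⟩, by omega⟩⟩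
      rw [hempty]
      simp
  have hcov : ∀ pt ∈ pvUF bs,
      ∃ F ∈ (((xs.zip xs.tail) ×ˢ ((ys.zip ys.tail) ×ˢ (zs.zip zs.tail))).map pvCellF), pt ∈ F := by
    intro pt hpt
    rw [mem_pvUF] at hpt
    obtain ⟨b, hb, hbm⟩ := hpt
    rw [mem_pvToF] at hbm
    obtain ⟨i1, i2, i3, i4, i5, i6⟩ := hbm
    obtain ⟨p, hp, c1, c2⟩ := pvPairs_find xs hxs b.1 (b.2.1 + 1) pt.1 (hmx b hb).1 (hmx b hb).2 i1 (by omega)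
    obtain ⟨q, hq, d1, d2⟩ := pvPairs_find ys hys b.2.2.1 (b.2.2.2.1 + 1) pt.2.1 (hmy b hb).1 (hmy b hb).2 i3 (by omega)
    obtain ⟨r, hr, e1', e2⟩ := pvPairs_find zs hzs b.2.2.2.2.1 (b.2.2.2.2.2 + 1) pt.2.2 (hmz b hb).1 (hmz b hb).2 i5 (by omega)
    refine ⟨pvCellF (p, q, r), List.mem_map_of_mem
      (List.mem_product.2 ⟨hp, List.mem_product.2 ⟨hq, hr⟩⟩), ?_⟩
    rw [mem_pvCellF]
    exact ⟨⟨c1, c2⟩, ⟨d1, d2⟩, e1', e2⟩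
  have hdisj : (((xs.zip xs.tail) ×ˢ ((ys.zip ys.tail) ×ˢ (zs.zip zs.tail))).map pvCellF).Pairwise
      Disjoint := by
    rw [List.pairwise_map]
    have hnd : ((xs.zip xs.tail) ×ˢ ((ys.zip ys.tail) ×ˢ (zs.zip zs.tail))).Nodup :=
      (pvPairs_nodup xs hxs).product ((pvPairs_nodup ys hys).product (pvPairs_nodup zs hzs))
    refine List.Pairwise.imp_of_mem ?_ hnd
    rintro ⟨p, q, r⟩ ⟨p', q', r'⟩ hc hd hne
    obtain ⟨hpx, hqr⟩ := List.mem_product.1 hc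
    obtain ⟨hqy, hrz⟩ := List.mem_product.1 hqr
    obtain ⟨hpx', hqr'⟩ := List.mem_product.1 hd
    obtain ⟨hqy', hrz'⟩ := List.mem_product.1 hqr'
    rw [Finset.disjoint_left]
    intro pt hpt hpt'
    rw [mem_pvCellF] at hpt hpt'
    obtain ⟨⟨m1, m2⟩, ⟨m3, m4⟩, m5, m6⟩ := hpt
    obtain ⟨⟨n1, n2⟩, ⟨n3, n4⟩, n5, n6⟩ := hpt'
    simp only at m1 m2 m3 m4 m5 m6 n1 n2 n3 n4 n5 n6
    by_cases h1 : p = p'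
    · by_cases h2 : q = q'
      · by_cases h3 : r = r'
        · exact hne (by rw [h1, h2, h3])
        · exact (Finset.disjoint_left.1 (pvPairs_disjoint zs hzs r hrz r' hrz' h3))
            (Finset.mem_Ico.2 ⟨m5, m6⟩) (Finset.mem_Ico.2 ⟨n5, n6⟩)
      · exact (Finset.disjoint_left.1 (pvPairs_disjoint ys hys q hqy q' hqy' h2))
          (Finset.mem_Ico.2 ⟨m3, m4⟩) (Finset.mem_Ico.2 ⟨n3, n4⟩)
    · exact (Finset.disjoint_left.1 (pvPairs_disjoint xs hxs p hpx p' hpx' h1))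
        (Finset.mem_Ico.2 ⟨m1, m2⟩) (Finset.mem_Ico.2 ⟨n1, n2⟩)
  rw [e1, List.map_congr_left key,
    show (fun c => ((pvUF bs ∩ pvCellF c).card : Int)) =
      ((fun F => ((pvUF bs ∩ F).card : Int)) ∘ pvCellF) from rfl,
    ← List.map_map]
  exact pvCard_partition _ _ hcov hdisj

theorem pvCellSum_card (bs : List (Int × Int × Int × Int × Int × Int)) :
    pvCellSum bs (pvSortedCoords (bs.flatMap (fun b => [b.1, b.2.1 + 1])))
      (pvSortedCoords (bs.flatMap (fun b => [b.2.2.1, b.2.2.2.1 + 1])))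
      (pvSortedCoords (bs.flatMap (fun b => [b.2.2.2.2.1, b.2.2.2.2.2 + 1]))) =
      ((pvUF bs).card : Int) := by
  refine pvGrid_card bs _ _ _ (pvSortedCoords_lt _) (pvSortedCoords_lt _) (pvSortedCoords_lt _)
    ?_ ?_ ?_ <;>
  · intro b hb
    constructor <;>
    · rw [mem_pvSortedCoords, List.mem_flatMap]
      exact ⟨b, hb, by simp⟩

-- ===== VERDICT (by name: the statement is the Claim_ definition above) =====
theorem count_uninterrupted_spec : Claim_equal_count_uninterrupted := by
  intro item rest _ _
  unfold Spec_count_uninterrupted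
  by_cases hre : rest = []
  · subst hre
    rw [count_uninterrupted]
    simp [pvConflicts, pvSubLoop, count_uninterrupted_alt]
  · rw [count_uninterrupted]
    have h1 := pvSubLoop_card (pvConflicts item.2.1 item.2.2.1 item.2.2.2 rest).length
      (pvConflicts item.2.1 item.2.2.1 item.2.2.2 rest) le_rfl
      (pvConflicts_proper item.2.1 item.2.2.1 item.2.2.2 rest)
    rw [pvConflicts_map_boxOf] at h1
    rw [h1]
    simp only [count_uninterrupted_alt, if_neg hre]
    rw [pvCellSum_card]
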